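-- pv_equiv track=rewrite | github.com/menudoproblema/mongoeco | src/mongoeco/engines/sqlite_query.py | parse_safe_literal_regex
-- ===== SOURCE A (Python) =====
-- def parse_safe_literal_regex(pattern: str, options: str) -> tuple[str, str, bool] | None:
--     ignore_case = False
--     if options:
--         if options != "i":
--             return None
--         ignore_case = True
--     anchored_start = pattern.startswith("^")
--     body = pattern[1:] if anchored_start else pattern
--     anchored_end = body.endswith("$")
--     if anchored_end:
--         body = body[:-1]
--     if anchored_start and body.endswith(".*"):
--         body = body[:-2]
--         anchored_end = False
--     if not body:
--         return None
--
--     literal_chars: list[str] = []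
--     index = 0
--     metacharacters = set(".^$*+?{}[]()|")
--     while index < len(body):
--         char = body[index]
--         if char == "\\":
--             index += 1
--             if index >= len(body):
--                 return None
--             literal_chars.append(body[index])
--         elif char in metacharacters:
--             return None
--         else:
--             literal_chars.append(char)
--         index += 1
--
--     if not literal_chars:
--         return None
--     literal = "".join(literal_chars)
--     if anchored_start and anchored_end:
--         return ("exact", literal, ignore_case)
--     if anchored_start:
--         return ("prefix", literal, ignore_case)
--     if anchored_end:
--         return ("suffix", literal, ignore_case)
--     return ("contains", literal, ignore_case)
-- ===== SOURCE B (Python) =====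
-- # Right-to-left parse: a character is escaped iff an odd number of backslashes
-- # immediately precedes it (parity of the trailing backslash run, via rstrip),
-- # instead of A's left-to-right escape-consuming scan.
--
-- META = set(".^$*+?{}[]()|")
-- KIND = {(True, True): "exact", (True, False): "prefix",
--         (False, True): "suffix", (False, False): "contains"}
--
--
-- def parse_safe_literal_regex(pattern: str, options: str) -> tuple[str, str, bool] | None:
--     if options not in ("", "i"):
--         return None
--     anchored_start = pattern.startswith("^")
--     body = pattern[1:] if anchored_start else pattern
--     anchored_end = body.endswith("$")
--     if anchored_end:
--         body = body[:-1]
--     if anchored_start and body.endswith(".*"):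
--         body = body[:-2]
--         anchored_end = False
--
--     out = []
--     s = body
--     while s:
--         c = s[-1]
--         t = s[:-1]
--         run = len(t) - len(t.rstrip("\\"))
--         if run % 2:            # c is escaped: take it literally, consume its backslash
--             out.append(c)
--             s = t[:-1]
--         elif c == "\\" or c in META:   # unescaped backslash (dangling opener) or metacharacter
--             return None
--         else:
--             out.append(c)
--             s = t
--     literal = "".join(reversed(out))
--     if not literal:
--         return None
--     return (KIND[anchored_start, anchored_end], literal, options == "i")
-- ===== Notes on version B (the rewrite author's own statement) =====
-- stated objective: alternative
-- what changed: B parses the body right-to-left, deciding whether each character is escaped by the parity of the run of backslashes immediately before it (computed with rstrip), instead of A's left-to-right escape-consuming index scan; the match kind is picked from an (anchored_start, anchored_end) table.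
import Mathlib
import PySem

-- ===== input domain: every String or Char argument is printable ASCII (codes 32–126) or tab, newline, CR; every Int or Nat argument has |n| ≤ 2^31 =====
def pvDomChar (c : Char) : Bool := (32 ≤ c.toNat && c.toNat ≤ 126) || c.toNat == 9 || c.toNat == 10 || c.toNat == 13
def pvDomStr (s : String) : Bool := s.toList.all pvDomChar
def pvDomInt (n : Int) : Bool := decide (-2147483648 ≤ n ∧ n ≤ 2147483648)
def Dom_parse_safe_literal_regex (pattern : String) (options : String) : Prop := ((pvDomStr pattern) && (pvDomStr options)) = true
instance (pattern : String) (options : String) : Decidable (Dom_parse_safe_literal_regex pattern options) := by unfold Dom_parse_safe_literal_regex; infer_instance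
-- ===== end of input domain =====

-- B parses the body right-to-left, deciding whether a character is escaped by the
-- parity of the run of backslashes before it, instead of A's left-to-right
-- escape-consuming scan (objective: alternative; same result, different algorithm).

-- ===== PORT A =====
-- metacharacters = set(".^$*+?{}[]()|")
def pvMetaA : PySem.Set Char :=
  PySem.Set.ofList ['.', '^', '$', '*', '+', '?', '{', '}', '[', ']', '(', ')', '|']

-- the while loop over (index, literal_chars); an escape advances index twice
def pvLoopA (body : List Char) (index : Nat) (acc : List Char) : Option (List Char) :=
  if h : index < body.length then
    let char := body[index]
    if char = '\\' then
      -- index += 1; if index >= len(body): return None; append body[index]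
      if h2 : index + 1 < body.length then
        pvLoopA body (index + 1 + 1) (acc ++ [body[index + 1]])
      else none
    else if PySem.Set.contains pvMetaA char then none
    else pvLoopA body (index + 1) (acc ++ [char])
  else some acc
termination_by body.length - index

def pvFinishA (body : List Char) (anchored_start anchored_end ignore_case : Bool) :
    Option (String × String × Bool) :=
  if body = [] then none
  else
    match pvLoopA body 0 [] with
    | none => none
    | some literal_chars =>
      if literal_chars = [] then none
      else
        let literal := String.ofList literal_chars   -- "".join(literal_chars)
        if anchored_start && anchored_end then some ("exact", literal, ignore_case)
        else if anchored_start then some ("prefix", literal, ignore_case)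
        else if anchored_end then some ("suffix", literal, ignore_case)
        else some ("contains", literal, ignore_case)

def pvBodyA (pattern : String) (ignore_case : Bool) : Option (String × String × Bool) :=
  let p := pattern.toList
  let anchored_start := PySem.Chars.startswith p ['^']
  let body := if anchored_start then PySem.Chars.slice p (some 1) none else p
  let anchored_end := PySem.Chars.endswith body ['$']
  let body := if anchored_end then PySem.Chars.slice body none (some (-1)) else body
  let st := if anchored_start && PySem.Chars.endswith body ['.', '*'] then
      (PySem.Chars.slice body none (some (-2)), false)
    else (body, anchored_end)
  pvFinishA st.1 anchored_start st.2 ignore_case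

def parse_safe_literal_regex (pattern : String) (options : String) : Option (String × String × Bool) :=
  -- ignore_case = False; if options: if options != "i": return None; ignore_case = True
  if options.toList ≠ [] then
    if options.toList ≠ ['i'] then none else pvBodyA pattern true
  else pvBodyA pattern false

-- ===== PORT B =====
-- META = set(".^$*+?{}[]()|")  (Source B tests 'c in META')
def pvMetaB : List Char := ['.', '^', '$', '*', '+', '?', '{', '}', '[', ']', '(', ')', '|']

-- KIND table, a Python dict
def pvKindB : PySem.Dict (Bool × Bool) String :=
  PySem.Dict.ofList [((true, true), "exact"), ((true, false), "prefix"),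
                     ((false, true), "suffix"), ((false, false), "contains")]

-- run = len(t) - len(t.rstrip("\\")) : t.rstrip("\\") removes exactly the trailing
-- backslashes, ported by hand (exact) as dropWhile on the reverse
def pvRunB (t : List Char) : Nat :=
  t.length - ((t.reverse.dropWhile (· == '\\')).reverse).length

-- the while loop: s shrinks from the right by one char (plain) or two (escape pair);
-- s.getLast is c = s[-1], s.dropLast is t = s[:-1]
def pvLoopB (s : List Char) (out : List Char) : Option (List Char) :=
  if h : s = [] then some out
  else
    if pvRunB s.dropLast % 2 = 1 then
      pvLoopB s.dropLast.dropLast (out ++ [s.getLast h])   -- escaped: consume its backslash too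
    else if s.getLast h = '\\' ∨ pvMetaB.contains (s.getLast h) then none
    else pvLoopB s.dropLast (out ++ [s.getLast h])
termination_by s.length
decreasing_by
  all_goals cases s with
  | nil => exact absurd rfl h
  | cons a l => simp only [List.length_dropLast, List.length_cons]; omega

def parse_safe_literal_regex_alt (pattern : String) (options : String) : Option (String × String × Bool) :=
  if ¬ (options.toList = [] ∨ options.toList = ['i']) then none   -- options not in ("", "i")
  else
    let anchored_start := PySem.Chars.startswith pattern.toList ['^']
    let body := if anchored_start then PySem.Chars.slice pattern.toList (some 1) none else pattern.toList
    let anchored_end := PySem.Chars.endswith body ['$']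
    let body := if anchored_end then PySem.Chars.slice body none (some (-1)) else body
    let st := if anchored_start && PySem.Chars.endswith body ['.', '*'] then
        (PySem.Chars.slice body none (some (-2)), false)
      else (body, anchored_end)
    (pvLoopB st.1 []).bind (fun out =>
      let literal := out.reverse                       -- "".join(reversed(out))
      if literal = [] then none
      else some (PySem.Dict.getD pvKindB (anchored_start, st.2) "",   -- KIND[…], key always present: getD is exact
                 String.ofList literal, decide (options.toList = ['i'])))

-- ===== PRECONDITION & SPEC =====
def Spec_parse_safe_literal_regex (pattern : String) (options : String) (out : Option (String × String × Bool)) : Prop := out = parse_safe_literal_regex_alt pattern options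
instance (pattern : String) (options : String) (out : Option (String × String × Bool)) : Decidable (Spec_parse_safe_literal_regex pattern options out) := by unfold Spec_parse_safe_literal_regex; infer_instance

-- ===== CLAIM (what is proved, stated in full; the proofs are below) =====
def Claim_equal_parse_safe_literal_regex : Prop := ∀ (pattern : String) (options : String), Dom_parse_safe_literal_regex pattern options → Spec_parse_safe_literal_regex pattern options (parse_safe_literal_regex pattern options)

-- ===== LEMMAS AND PROOFS =====

-- structural (left-to-right) version of A's scan, the bridge between the two loops
def pvScan : List Char → List Char → Option (List Char)
  | [], acc => some acc
  | c :: r, acc =>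
    if c = '\\' then
      match r with
      | [] => none
      | d :: r' => pvScan r' (acc ++ [d])
    else if PySem.Set.contains pvMetaA c then none
    else pvScan r (acc ++ [c])

theorem pvScan_nil (acc : List Char) : pvScan [] acc = some acc := rfl

theorem pvScan_cons (c : Char) (r acc : List Char) :
    pvScan (c :: r) acc =
      if c = '\\' then
        (match r with
         | [] => none
         | d :: r' => pvScan r' (acc ++ [d]))
      else if PySem.Set.contains pvMetaA c then none
      else pvScan r (acc ++ [c]) := by cases r <;> rfl

theorem pvScan_esc (d : Char) (r acc : List Char) :
    pvScan ('\\' :: d :: r) acc = pvScan r (acc ++ [d]) := rfl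

theorem pvScan_esc_end (acc : List Char) : pvScan ['\\'] acc = none := rfl

-- A's index loop is the structural scan on the dropped suffix
theorem pvLoop_eq (body : List Char) : ∀ (index : Nat) (acc : List Char),
    pvLoopA body index acc = pvScan (body.drop index) acc := by
  intro index acc
  induction hn : body.length - index using Nat.strong_induction_on generalizing index acc with
  | _ n ih =>
  unfold pvLoopA
  by_cases h : index < body.length
  · rw [List.drop_eq_getElem_cons h]
    by_cases hc : body[index] = '\\'
    · by_cases h2 : index + 1 < body.length
      · rw [List.drop_eq_getElem_cons h2, hc, pvScan_esc]
        simp only [h, hc, h2, dif_pos, if_pos]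
        exact ih (body.length - (index + 1 + 1)) (by omega) _ _ rfl
      · have hd2 : body.drop (index + 1) = [] := List.drop_eq_nil_of_le (by omega)
        rw [hd2, hc, pvScan_esc_end]
        simp only [h, hc, h2, dif_pos, dif_neg, not_false_iff, if_pos]
    · rw [pvScan_cons, if_neg hc]
      simp only [h, dif_pos]
      rw [if_neg hc]
      by_cases hm : PySem.Set.contains pvMetaA body[index] = true
      · rw [if_pos hm, if_pos hm]
      · rw [if_neg hm, if_neg hm]
        exact ih (body.length - (index + 1)) (by omega) _ _ rfl
  · rw [List.drop_eq_nil_of_le (by omega : body.length ≤ index), pvScan_nil]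
    simp only [h, dif_neg, not_false_iff]

-- the two membership tests are over the same 13 characters
theorem pvMeta_eq (c : Char) : PySem.Set.contains pvMetaA c = pvMetaB.contains c := by
  have h : pvMetaA = pvMetaB := by decide
  rw [h]; simp [PySem.Set.contains]

-- accumulator lemma for the scan
theorem pvScan_acc (s : List Char) : ∀ (acc : List Char),
    pvScan s acc = (pvScan s []).map (acc ++ ·) := by
  induction hn : s.length using Nat.strong_induction_on generalizing s with
  | _ n ih =>
  intro acc
  match s with
  | [] => simp [pvScan]
  | c :: r =>
    by_cases hc : c = '\\'
    · subst hc
      cases r with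
      | nil => rfl
      | cons d r' =>
        rw [pvScan_esc, pvScan_esc,
          ih r'.length (by simp at hn; omega) r' rfl (acc ++ [d]),
          ih r'.length (by simp at hn; omega) r' rfl ([] ++ [d])]
        cases pvScan r' [] <;> simp
    · rw [pvScan_cons, if_neg hc, pvScan_cons, if_neg hc]
      by_cases hm : PySem.Set.contains pvMetaA c = true
      · rw [if_pos hm, if_pos hm]; rfl
      · rw [if_neg hm, if_neg hm,
          ih r.length (by simp at hn; omega) r rfl (acc ++ [c]),
          ih r.length (by simp at hn; omega) r rfl ([] ++ [c])]
        cases pvScan r [] <;> simp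

-- trailing-backslash run length
def pvRun (t : List Char) : Nat := (t.reverse.takeWhile (· == '\\')).length

theorem pvRunB_eq (t : List Char) : pvRunB t = pvRun t := by
  unfold pvRunB pvRun
  have h := congrArg List.length
    (List.takeWhile_append_dropWhile (p := (· == '\\')) (l := t.reverse))
  simp only [List.length_append, List.length_reverse] at *
  omega

theorem pvRun_le (t : List Char) : pvRun t ≤ t.length := by
  unfold pvRun
  calc (t.reverse.takeWhile (· == '\\')).length ≤ t.reverse.length :=
        List.Sublist.length_le (List.takeWhile_sublist _)
    _ = t.length := List.length_reverse

theorem pvRun_cons (y : Char) (ys : List Char) :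
    pvRun (y :: ys) = if pvRun ys = ys.length then
      (if y = '\\' then ys.length + 1 else ys.length) else pvRun ys := by
  unfold pvRun
  rw [List.reverse_cons, List.takeWhile_append]
  simp only [List.length_reverse]
  by_cases h : (List.takeWhile (fun x => x == '\\') ys.reverse).length = ys.length
  · rw [if_pos h, if_pos h]
    by_cases hy : y = '\\'
    · subst hy; simp [List.takeWhile]
    · rw [if_neg hy]
      simp [List.takeWhile, show (y == '\\') = false from by simp [hy]]
  · rw [if_neg h, if_neg h]

theorem pvRun_cons_ne (c : Char) (r : List Char) (hc : c ≠ '\\') : pvRun (c :: r) = pvRun r := by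
  rw [pvRun_cons, if_neg hc]
  split_ifs with h
  · omega
  · rfl

theorem pvRun_pair (d : Char) (r : List Char) : pvRun ('\\' :: d :: r) % 2 = pvRun r % 2 := by
  have hle := pvRun_le r
  rw [pvRun_cons, pvRun_cons]
  simp only [List.length_cons]
  split_ifs <;> omega

theorem pvScan_acc1 (s : List Char) (d : Char) :
    pvScan s ([] ++ [d]) = (pvScan s []).map ([d] ++ ·) := by
  rw [pvScan_acc]
  cases pvScan s [] <;> simp

-- the snoc characterisation of A's scan, by parity of the trailing run
theorem pvH (t : List Char) (c : Char) :
    (pvRun t % 2 = 1 → pvScan (t ++ [c]) [] = (pvScan t.dropLast []).map (· ++ [c])) ∧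
    (pvRun t % 2 = 0 → c = '\\' → pvScan (t ++ [c]) [] = none) ∧
    (pvRun t % 2 = 0 → c ≠ '\\' →
      pvScan (t ++ [c]) [] = if pvMetaB.contains c then none
                             else (pvScan t []).map (· ++ [c])) := by
  induction hn : t.length using Nat.strong_induction_on generalizing t with
  | _ n ih =>
  match t with
  | [] =>
    refine ⟨fun h1 => by simp [pvRun] at h1, fun _ hc => by subst hc; rfl, fun _ hc => ?_⟩
    rw [List.nil_append, pvScan_cons, if_neg hc, pvMeta_eq]
    by_cases hm : pvMetaB.contains c = true
    · rw [if_pos hm, if_pos hm]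
    · rw [if_neg hm, if_neg hm]; rfl
  | e :: r =>
    by_cases he : e = '\\'
    · subst he
      cases r with
      | nil =>
        refine ⟨fun _ => by simp [pvScan_esc, pvScan], fun h0 _ => ?_, fun h0 _ => ?_⟩ <;>
          simp [pvRun] at h0
      | cons d r =>
        have hlen : r.length < n := by simp at hn; omega
        have hdl : ∀ x, pvScan ('\\' :: d :: r ++ [x]) [] =
            (pvScan (r ++ [x]) []).map ([d] ++ ·) := by
          intro x
          rw [List.cons_append, List.cons_append, pvScan_esc, pvScan_acc1]
        have hpar := pvRun_pair d r
        refine ⟨fun h1 => ?_, fun h0 hc => ?_, fun h0 hc => ?_⟩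
        · have hodd : pvRun r % 2 = 1 := by omega
          have hr : r ≠ [] := by rintro rfl; simp [pvRun] at hodd
          have hdl2 : ('\\' :: d :: r).dropLast = '\\' :: d :: r.dropLast := by
            cases r with
            | nil => exact absurd rfl hr
            | cons a l => rfl
          rw [hdl c, ((ih r.length hlen r rfl).1 hodd), hdl2, pvScan_esc, pvScan_acc1]
          cases pvScan r.dropLast [] <;> simp
        · have h0r : pvRun r % 2 = 0 := by omega
          rw [hdl c, ((ih r.length hlen r rfl).2.1 h0r hc)]
          rfl
        · have h0r : pvRun r % 2 = 0 := by omega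
          have hdl0 : pvScan ('\\' :: d :: r) [] = (pvScan r []).map ([d] ++ ·) := by
            rw [pvScan_esc, pvScan_acc1]
          rw [hdl c, ((ih r.length hlen r rfl).2.2 h0r hc), hdl0]
          by_cases hm : pvMetaB.contains c = true
          · rw [if_pos hm, if_pos hm]; rfl
          · rw [if_neg hm, if_neg hm]
            cases pvScan r [] <;> simp
    · -- plain leading character e
      have hlen : r.length < n := by simp at hn; omega
      have hpar : pvRun (e :: r) = pvRun r := pvRun_cons_ne e r he
      have hstep : ∀ x, pvScan (e :: r ++ [x]) [] =
          if PySem.Set.contains pvMetaA e then none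
          else (pvScan (r ++ [x]) []).map ([e] ++ ·) := by
        intro x
        rw [List.cons_append, pvScan_cons, if_neg he]
        by_cases hm : PySem.Set.contains pvMetaA e = true
        · rw [if_pos hm, if_pos hm]
        · rw [if_neg hm, if_neg hm, pvScan_acc1]
      have hstep0 : pvScan (e :: r) [] =
          if PySem.Set.contains pvMetaA e then none
          else (pvScan r []).map ([e] ++ ·) := by
        rw [pvScan_cons, if_neg he]
        by_cases hm : PySem.Set.contains pvMetaA e = true
        · rw [if_pos hm, if_pos hm]
        · rw [if_neg hm, if_neg hm, pvScan_acc1]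
      refine ⟨fun h1 => ?_, fun h0 hc => ?_, fun h0 hc => ?_⟩
      · have hodd : pvRun r % 2 = 1 := by omega
        have hr : r ≠ [] := by rintro rfl; simp [pvRun] at hodd
        have hdl2 : (e :: r).dropLast = e :: r.dropLast := by
          cases r with
          | nil => exact absurd rfl hr
          | cons a l => rfl
        have hstepd : pvScan (e :: r.dropLast) [] =
            if PySem.Set.contains pvMetaA e then none
            else (pvScan r.dropLast []).map ([e] ++ ·) := by
          rw [pvScan_cons, if_neg he]
          by_cases hm : PySem.Set.contains pvMetaA e = true
          · rw [if_pos hm, if_pos hm]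
          · rw [if_neg hm, if_neg hm, pvScan_acc1]
        rw [hstep c, hdl2, hstepd, ((ih r.length hlen r rfl).1 hodd)]
        by_cases hm : PySem.Set.contains pvMetaA e = true
        · rw [if_pos hm, if_pos hm]; rfl
        · rw [if_neg hm, if_neg hm]
          cases pvScan r.dropLast [] <;> simp
      · have h0r : pvRun r % 2 = 0 := by omega
        rw [hstep c, ((ih r.length hlen r rfl).2.1 h0r hc)]
        split_ifs <;> rfl
      · have h0r : pvRun r % 2 = 0 := by omega
        rw [hstep c, hstep0, ((ih r.length hlen r rfl).2.2 h0r hc)]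
        by_cases hm : PySem.Set.contains pvMetaA e = true
        · rw [if_pos hm, if_pos hm]
          split_ifs <;> rfl
        · rw [if_neg hm, if_neg hm]
          by_cases hmc : pvMetaB.contains c = true
          · rw [if_pos hmc, if_pos hmc]; rfl
          · rw [if_neg hmc, if_neg hmc]
            cases pvScan r [] <;> simp

-- B's right-to-left loop computes the reverse of A's scan
theorem pvLoopB_eq (s : List Char) : ∀ (out : List Char),
    pvLoopB s out = (pvScan s []).map (fun l => out ++ l.reverse) := by
  induction hn : s.length using Nat.strong_induction_on generalizing s with
  | _ n ih =>
  intro out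
  rw [pvLoopB]
  by_cases h : s = []
  · subst h; simp [pvScan]
  · rw [dif_neg h]
    have hs : s.dropLast ++ [s.getLast h] = s := List.dropLast_append_getLast h
    have hlt : s.dropLast.length < n := by
      rw [← hn]; conv_rhs => rw [← hs]
      simp
    have hlt2 : s.dropLast.dropLast.length < n := by
      have h1 := List.length_dropLast (xs := s.dropLast)
      omega
    conv_rhs => rw [← hs]
    rw [pvRunB_eq]
    by_cases hp : pvRun s.dropLast % 2 = 1
    · rw [if_pos hp, ih s.dropLast.dropLast.length hlt2 s.dropLast.dropLast rfl (out ++ [s.getLast h]),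
        ((pvH s.dropLast (s.getLast h)).1 hp)]
      cases pvScan s.dropLast.dropLast [] <;> simp
    · rw [if_neg hp]
      have hp0 : pvRun s.dropLast % 2 = 0 := by omega
      by_cases hbs : s.getLast h = '\\' ∨ pvMetaB.contains (s.getLast h) = true
      · rw [if_pos hbs]
        by_cases hb : s.getLast h = '\\'
        · rw [((pvH s.dropLast (s.getLast h)).2.1 hp0 hb)]; rfl
        · have hm : pvMetaB.contains (s.getLast h) = true := by tauto
          rw [((pvH s.dropLast (s.getLast h)).2.2 hp0 hb), if_pos hm]; rfl
      · rw [if_neg hbs]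
        push Not at hbs
        obtain ⟨hb, hm⟩ := hbs
        rw [ih s.dropLast.length hlt s.dropLast rfl (out ++ [s.getLast h]),
          ((pvH s.dropLast (s.getLast h)).2.2 hp0 hb), if_neg hm]
        cases pvScan s.dropLast [] <;> simp

-- A's trailer equals B's trailer
theorem pvFinish_eq (body : List Char) (as ae ic : Bool) :
    pvFinishA body as ae ic =
      (pvLoopB body []).bind (fun out =>
        if out.reverse = [] then none
        else some (PySem.Dict.getD pvKindB (as, ae) "", String.ofList out.reverse, ic)) := by
  unfold pvFinishA
  have hl : pvLoopA body 0 [] = pvScan body [] := by simpa using pvLoop_eq body 0 []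
  rw [hl, pvLoopB_eq]
  by_cases hb : body = []
  · subst hb; simp [pvScan]
  · rw [if_neg hb]
    cases hL : pvScan body [] with
    | none => rfl
    | some lit =>
      by_cases he : lit = []
      · simp [he]
      · simp only [Option.map_some, Option.bind_some, List.nil_append, List.reverse_reverse,
          List.reverse_eq_nil_iff, he, if_false]
        cases as <;> cases ae <;> rfl

-- main: the two ports agree on every input
theorem parse_safe_literal_regex_eq (pattern options : String) :
    parse_safe_literal_regex pattern options = parse_safe_literal_regex_alt pattern options := by
  unfold parse_safe_literal_regex parse_safe_literal_regex_alt pvBodyA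
  simp only [pvFinish_eq]
  by_cases ho1 : options.toList = []
  · simp [ho1]
  · by_cases ho2 : options.toList = ['i']
    · simp [ho2]
    · simp [ho1, ho2]

-- ===== VERDICT (by name: the statement is the Claim_ definition above) =====
theorem parse_safe_literal_regex_spec : Claim_equal_parse_safe_literal_regex := by
  intro pattern options _
  exact parse_safe_literal_regex_eq pattern options
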